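-- pv_equiv track=rewrite | github.com/johnMamish/lilac | notes/theta_pyramid.py | generate_my_histogram_guess
-- ===== SOURCE A (Python) =====
-- def generate_my_histogram_guess(qn):
--     mid = qn >> 1
--     ret = {}
--     if (qn % 2 == 0):
--         for i in range(0, mid):
--             ret[i] = (i + 1)
--
--         for i in range(mid, qn + 1):
--             ret[i] = (qn - i + 1)
--     else:
--         for i in range(0, mid):
--             ret[i] = (i + 1)
--
--         for i in range(mid, qn):
--             ret[i + 1] = (qn - i)
--
--
--     return ret
-- ===== SOURCE B (Python) =====
-- def generate_my_histogram_guess(qn):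
--     mid = qn >> 1
--     asc = list(range(1, mid + 1))
--     values = asc + [mid + 1] + asc[::-1]
--     if qn % 2 == 0:
--         keys = list(range(0, qn + 1))
--     else:
--         keys = list(range(0, mid)) + list(range(mid + 1, qn + 1))
--     return dict(zip(keys, values))
-- ===== Notes on version B (the rewrite author's own statement) =====
-- stated objective: alternative
-- what changed: Instead of A's two directional fill loops, B constructs the symmetric value sequence once by mirroring a half-ramp (asc + [mid+1] + reversed(asc)), builds the key list (omitting the middle key when qn is odd), and zips the two into the dict.
import Mathlib
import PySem

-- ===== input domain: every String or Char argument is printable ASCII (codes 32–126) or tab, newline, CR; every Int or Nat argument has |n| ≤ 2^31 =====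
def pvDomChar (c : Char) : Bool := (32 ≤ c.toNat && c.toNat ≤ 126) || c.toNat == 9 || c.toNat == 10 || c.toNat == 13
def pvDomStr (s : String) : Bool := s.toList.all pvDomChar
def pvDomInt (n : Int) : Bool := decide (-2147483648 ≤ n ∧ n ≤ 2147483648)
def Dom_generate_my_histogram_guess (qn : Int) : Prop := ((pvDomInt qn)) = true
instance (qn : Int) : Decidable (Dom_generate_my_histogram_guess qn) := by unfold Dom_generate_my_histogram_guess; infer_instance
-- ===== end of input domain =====

-- B replaces A's two directional fill loops by a staged construction: it mirrors a half-ramp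
-- into the symmetric value sequence and zips it onto the key list (objective: alternative).

-- ===== PORT A =====
def generate_my_histogram_guess (qn : Int) : List (Int × Int) :=
  let mid := qn >>> (1 : Nat)
  let ret : PySem.Dict Int Int := PySem.Dict.empty
  if PySem.Int.mod qn 2 = 0 then
    let ret := (PySem.List.pyRange 0 mid 1).foldl (fun d i => d.insert i (i + 1)) ret
    let ret := (PySem.List.pyRange mid (qn + 1) 1).foldl (fun d i => d.insert i (qn - i + 1)) ret
    ret.items
  else
    let ret := (PySem.List.pyRange 0 mid 1).foldl (fun d i => d.insert i (i + 1)) ret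
    let ret := (PySem.List.pyRange mid qn 1).foldl (fun d i => d.insert (i + 1) (qn - i)) ret
    ret.items

-- ===== PORT B =====
def generate_my_histogram_guess_alt (qn : Int) : List (Int × Int) :=
  let mid := qn >>> (1 : Nat)
  let asc := PySem.List.pyRange 1 (mid + 1) 1
  -- asc[::-1] is ported as List.reverse (exact: full negative-step slice of a list)
  let values := asc ++ [mid + 1] ++ asc.reverse
  let keys := if PySem.Int.mod qn 2 = 0 then PySem.List.pyRange 0 (qn + 1) 1
    else PySem.List.pyRange 0 mid 1 ++ PySem.List.pyRange (mid + 1) (qn + 1) 1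
  -- dict(zip(keys, values)) = insert the zipped pairs in order into an empty dict
  ((keys.zip values).foldl (fun d kv => d.insert kv.1 kv.2)
    (PySem.Dict.empty : PySem.Dict Int Int)).items

-- ===== PRECONDITION & SPEC =====
def Spec_generate_my_histogram_guess (qn : Int) (out : List (Int × Int)) : Prop := out = generate_my_histogram_guess_alt qn
instance (qn : Int) (out : List (Int × Int)) : Decidable (Spec_generate_my_histogram_guess qn out) := by unfold Spec_generate_my_histogram_guess; infer_instance

-- ===== CLAIM (what is proved, stated in full; the proofs are below) =====
def Claim_equal_generate_my_histogram_guess : Prop := ∀ (qn : Int), Dom_generate_my_histogram_guess qn → Spec_generate_my_histogram_guess qn (generate_my_histogram_guess qn)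

-- ===== LEMMAS AND PROOFS =====

theorem pv_shift_one (qn : Int) : qn >>> (1 : Nat) = qn / 2 := by
  rw [Int.shiftRight_eq_div_pow]; norm_num

theorem pv_mod2 (qn : Int) : PySem.Int.mod qn 2 = qn % 2 :=
  PySem.Int.mod_eq_emod_of_pos (by norm_num)

theorem pv_zip_low (m : Int) :
    (PySem.List.pyRange 0 m 1).zip (PySem.List.pyRange 1 (m + 1) 1)
      = (PySem.List.pyRange 0 m 1).map (fun i => (i, i + 1)) := by
  apply List.ext_getElem
  · simp [List.length_zip, PySem.List.length_pyRange_one]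
  · intro k h1 h2
    simp only [List.getElem_zip, List.getElem_map, PySem.List.getElem_pyRange_one]
    refine Prod.ext rfl ?_
    ring

theorem pv_zip_rev (M t : Int) (hM : 0 ≤ M) :
    (PySem.List.pyRange (t - M + 1) (t + 1) 1).zip (PySem.List.pyRange 1 (M + 1) 1).reverse
      = (PySem.List.pyRange (t - M + 1) (t + 1) 1).map (fun i => (i, t - i + 1)) := by
  apply List.ext_getElem
  · simp [List.length_zip, PySem.List.length_pyRange_one]
  · intro k h1 h2
    have hk : k < M.toNat := by
      simp [List.length_zip, PySem.List.length_pyRange_one] at h1; omega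
    simp only [List.getElem_zip, List.getElem_map, List.getElem_reverse,
      PySem.List.getElem_pyRange_one, PySem.List.length_pyRange_one]
    refine Prod.ext rfl ?_
    push_cast
    omega

theorem pv_rev_snoc (m : Int) (hm : 0 ≤ m) :
    ((m+1) :: (PySem.List.pyRange 1 (m+1) 1).reverse)
      = (PySem.List.pyRange 1 (m+1+1) 1).reverse := by
  rw [PySem.List.pyRange_one_succ_right (a := (1:Int)) (b := m+1) (by omega),
      List.reverse_append]
  rfl

theorem pv_main (qn : Int) : generate_my_histogram_guess qn = generate_my_histogram_guess_alt qn := by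
  simp only [generate_my_histogram_guess, generate_my_histogram_guess_alt, pv_shift_one, pv_mod2]
  by_cases he : qn % 2 = 0
  · -- even
    obtain ⟨m, rfl⟩ : ∃ m, qn = 2 * m := ⟨qn / 2, by omega⟩
    have hm : (2 * m) / 2 = m := by omega
    simp only [he, if_pos, hm]
    by_cases hneg : m < 0
    · rw [PySem.List.pyRange_one_eq_nil (a := (0:Int)) (b := m) (by omega),
          PySem.List.pyRange_one_eq_nil (a := m) (b := 2*m+1) (by omega),
          PySem.List.pyRange_one_eq_nil (a := (0:Int)) (b := 2*m+1) (by omega)]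
      rfl
    · push Not at hneg
      rw [List.append_assoc, List.singleton_append, pv_rev_snoc m hneg,
          PySem.List.pyRange_one_append 0 m (2*m+1) (by omega) (by omega),
          List.zip_append (by simp [PySem.List.length_pyRange_one]),
          pv_zip_low]
      have hz := pv_zip_rev (m+1) (2*m) (by omega)
      rw [show ((2*m) - (m+1) + 1 : Int) = m by ring] at hz
      rw [hz]
      simp only [List.foldl_append, List.foldl_map]
  · -- odd
    obtain ⟨m, rfl⟩ : ∃ m, qn = 2 * m + 1 := ⟨qn / 2, by omega⟩
    have hm : (2 * m + 1) / 2 = m := by omega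
    simp only [he, if_false, hm]
    by_cases hneg : m < 0
    · rw [PySem.List.pyRange_one_eq_nil (a := (0:Int)) (b := m) (by omega),
          PySem.List.pyRange_one_eq_nil (a := m) (b := 2*m+1) (by omega),
          PySem.List.pyRange_one_eq_nil (a := m+1) (b := 2*m+1+1) (by omega)]
      simp
    · push Not at hneg
      rw [List.append_assoc, List.singleton_append, pv_rev_snoc m hneg,
          List.zip_append (by simp [PySem.List.length_pyRange_one]),
          pv_zip_low]
      have hz := pv_zip_rev (m+1) (2*m+1) (by omega)
      rw [show ((2*m+1) - (m+1) + 1 : Int) = m + 1 by ring,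
          show ((2*m+1) + 1 : Int) = 2*m+1+1 by ring] at hz
      rw [hz]
      simp only [List.foldl_append, List.foldl_map]
      rw [PySem.List.pyRange_one m (2*m+1), PySem.List.pyRange_one (m+1) (2*m+1+1),
          show (2*m+1 - m : Int) = m + 1 by ring,
          show (2*m+1+1 - (m+1) : Int) = m + 1 by ring]
      simp only [List.foldl_map]
      have hfun : (fun (x : PySem.Dict Int Int) (y : Nat) =>
            x.insert (m + (y:Int) + 1) (2*m+1 - (m + (y:Int))))
          = (fun (x : PySem.Dict Int Int) (y : Nat) =>
            x.insert (m + 1 + (y:Int)) (2*m+1 - (m + 1 + (y:Int)) + 1)) := by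
        funext x y; congr 1 <;> ring
      rw [hfun]

-- ===== VERDICT (by name: the statement is the Claim_ definition above) =====
theorem generate_my_histogram_guess_spec : Claim_equal_generate_my_histogram_guess := by
  intro qn _
  exact pv_main qn
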